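-- pv_equiv track=rewrite | github.com/libardo667/worldweaver | worldweaver_engine/src/services/command_interpreter.py | _join_world_fact_snippets
-- ===== SOURCE A (Python) =====
-- from typing import Any, Dict, List, Optional
--
-- _MAX_FACT_PROMPT_CHARS = 900
--
-- def _join_world_fact_snippets(snippets: List[str]) -> str:
--     if not snippets:
--         return "None"
--
--     selected: List[str] = []
--     used_chars = 0
--     for snippet in snippets:
--         separator_chars = 2 if selected else 0
--         if used_chars + separator_chars + len(snippet) > _MAX_FACT_PROMPT_CHARS:
--             break
--         selected.append(snippet)
--         used_chars += separator_chars + len(snippet)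
--
--     return "; ".join(selected) if selected else "None"
-- ===== SOURCE B (Python) =====
-- from typing import List
--
-- _MAX_FACT_PROMPT_CHARS = 900
--
-- def _join_world_fact_snippets(snippets: List[str]) -> str:
--     # totals[i] = len of "; ".join(snippets[:i+1]); strictly increasing, so we can
--     # BINARY-SEARCH it for the first prefix whose join would exceed the budget.
--     totals: List[int] = []
--     t = -2
--     for s in snippets:
--         t += 2 + len(s)
--         totals.append(t)
--     lo, hi = 0, len(totals)
--     while lo < hi:
--         mid = (lo + hi) // 2
--         if totals[mid] > _MAX_FACT_PROMPT_CHARS: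
--             hi = mid
--         else:
--             lo = mid + 1
--     return "; ".join(snippets[:lo]) if lo else "None"
-- ===== Notes on version B (the rewrite author's own statement) =====
-- stated objective: alternative
-- what changed: Replaces A's accumulator-and-break selection loop with a precomputed strictly-increasing cumulative join-length table that is BINARY-SEARCHED for the first prefix over the 900-char budget, followed by one slice+join.
import Mathlib
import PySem

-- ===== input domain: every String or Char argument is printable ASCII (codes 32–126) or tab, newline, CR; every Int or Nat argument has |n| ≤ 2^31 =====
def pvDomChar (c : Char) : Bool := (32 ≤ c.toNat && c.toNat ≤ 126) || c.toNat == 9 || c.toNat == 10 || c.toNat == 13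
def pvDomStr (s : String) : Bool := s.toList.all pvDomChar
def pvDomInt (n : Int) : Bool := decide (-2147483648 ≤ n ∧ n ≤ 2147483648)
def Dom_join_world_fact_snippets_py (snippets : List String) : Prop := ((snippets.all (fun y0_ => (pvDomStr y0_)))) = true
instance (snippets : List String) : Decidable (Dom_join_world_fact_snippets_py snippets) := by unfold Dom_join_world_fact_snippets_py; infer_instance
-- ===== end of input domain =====

-- B replaces A's accumulator-and-break selection loop by a cumulative join-length table
-- that is binary-searched for the first prefix over the 900-char budget, then one
-- slice+join (objective: alternative).

-- ===== PORT A =====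
-- the for-loop over snippets with state (selected, used_chars); `break` = return of the state
def joinAloop : List String → List String → Int → List String
  | [], selected, _ => selected
  | snippet :: rest, selected, used_chars =>
    let separator_chars : Int := if selected.isEmpty then 0 else 2
    if used_chars + separator_chars + (PySem.Str.len snippet : Int) > 900 then selected
    else joinAloop rest (selected ++ [snippet]) (used_chars + separator_chars + (PySem.Str.len snippet : Int))

def join_world_fact_snippets_py (snippets : List String) : String :=
  if snippets.isEmpty then "None"
  else
    let selected := joinAloop snippets [] 0
    if selected.isEmpty then "None" else PySem.Str.join "; " selected

-- ===== PORT B =====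
-- totals[i] = length of "; ".join(snippets[:i+1]) (Source B's accumulate loop)
def buildTotals : List String → Int → List Int
  | [], _ => []
  | s :: rest, t => (t + 2 + (PySem.Str.len s : Int)) :: buildTotals rest (t + 2 + (PySem.Str.len s : Int))

-- Source B's `while lo < hi` binary search; totals[mid] is always in range (lo ≤ mid < hi ≤ len),
-- so `getD mid 0` is exact for Python's totals[mid]
def bsearch (totals : List Int) (lo hi : Nat) : Nat :=
  if lo < hi then
    if totals.getD ((lo + hi) / 2) 0 > 900 then bsearch totals lo ((lo + hi) / 2)
    else bsearch totals (((lo + hi) / 2) + 1) hi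
  else lo
termination_by hi - lo
decreasing_by all_goals omega

def join_world_fact_snippets_py_alt (snippets : List String) : String :=
  let totals := buildTotals snippets (-2)
  let k := bsearch totals 0 totals.length
  if k ≠ 0 then PySem.Str.join "; " (snippets.take k) else "None"

-- ===== PRECONDITION & SPEC =====
def Spec_join_world_fact_snippets_py (snippets : List String) (out : String) : Prop := out = join_world_fact_snippets_py_alt snippets
instance (snippets : List String) (out : String) : Decidable (Spec_join_world_fact_snippets_py snippets out) := by unfold Spec_join_world_fact_snippets_py; infer_instance

-- ===== CLAIM (what is proved, stated in full; the proofs are below) =====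
def Claim_equal_join_world_fact_snippets_py : Prop := ∀ (snippets : List String), Dom_join_world_fact_snippets_py snippets → Spec_join_world_fact_snippets_py snippets (join_world_fact_snippets_py snippets)

-- ===== LEMMAS AND PROOFS =====

-- proof-only helper: the index of the first cumulative total over 900 (linear spec of the search)
def firstOver : List Int → Nat
  | [] => 0
  | t :: rest => if t > 900 then 0 else firstOver rest + 1

lemma firstOver_le_length (l : List Int) : firstOver l ≤ l.length := by
  induction l with
  | nil => simp [firstOver]
  | cons t rest ih => simp only [firstOver, List.length_cons]; split <;> omega

lemma firstOver_lt_le (l : List Int) : ∀ i, i < firstOver l → l.getD i 0 ≤ 900 := by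
  induction l with
  | nil => simp [firstOver]
  | cons t rest ih =>
    intro i hi
    simp only [firstOver] at hi
    split at hi
    · omega
    · cases i with
      | zero => simpa using by omega
      | succ j => simpa using ih j (by omega)

lemma firstOver_over (l : List Int) : firstOver l < l.length → l.getD (firstOver l) 0 > 900 := by
  induction l with
  | nil => simp [firstOver]
  | cons t rest ih =>
    simp only [firstOver, List.length_cons]
    by_cases h : t > 900
    · rw [if_pos h]; intro _; simpa using h
    · rw [if_neg h]; intro hlt; simpa using ih (by omega)

-- uniqueness: any index with the three first-over properties equals firstOver
lemma firstOver_unique (l : List Int) (r : Nat) (hle : r ≤ l.length)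
    (hlt : ∀ i, i < r → l.getD i 0 ≤ 900) (hov : r < l.length → l.getD r 0 > 900) :
    r = firstOver l := by
  by_contra hne
  rcases Nat.lt_or_ge r (firstOver l) with h | h
  · have h1 := firstOver_lt_le l r h
    have h2 := hov (by have := firstOver_le_length l; omega)
    omega
  · have hflt : firstOver l < r := by omega
    have h1 := hlt (firstOver l) hflt
    have h2 := firstOver_over l (by omega)
    omega

-- elements of buildTotals l t are bounded below by t
lemma buildTotals_lb (l : List String) : ∀ (t : Int) (j : Nat),
    j < (buildTotals l t).length → t ≤ (buildTotals l t).getD j 0 := by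
  induction l with
  | nil => simp [buildTotals]
  | cons s rest ih =>
    intro t j hj
    have hlen : (0:Int) ≤ (PySem.Str.len s : Int) := Int.natCast_nonneg _
    cases j with
    | zero => simp [buildTotals]; omega
    | succ j' =>
      simp only [buildTotals, List.getD_cons_succ]
      have := ih (t + 2 + (PySem.Str.len s : Int)) j'
        (by simpa [buildTotals] using Nat.lt_of_succ_lt_succ (by simpa [buildTotals] using hj))
      omega

-- buildTotals is monotone in the index
lemma buildTotals_mono (l : List String) : ∀ (t : Int) (i j : Nat), i ≤ j →
    j < (buildTotals l t).length →
    (buildTotals l t).getD i 0 ≤ (buildTotals l t).getD j 0 := by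
  induction l with
  | nil => simp [buildTotals]
  | cons s rest ih =>
    intro t i j hij hj
    simp only [buildTotals, List.length_cons] at hj ⊢
    cases i with
    | zero =>
      cases j with
      | zero => simp
      | succ j' =>
        simp only [List.getD_cons_zero, List.getD_cons_succ]
        exact buildTotals_lb rest _ j' (by omega)
    | succ i' =>
      cases j with
      | zero => omega
      | succ j' =>
        simp only [List.getD_cons_succ]
        exact ih _ i' j' (by omega) (by omega)

-- binary-search correctness on a monotone table, by the loop invariant
lemma bsearch_eq_firstOver (totals : List Int)
    (hmono : ∀ i j, i ≤ j → j < totals.length → totals.getD i 0 ≤ totals.getD j 0) :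
    ∀ (n lo hi : Nat), hi - lo ≤ n → lo ≤ hi → hi ≤ totals.length →
    (∀ i, i < lo → totals.getD i 0 ≤ 900) →
    (∀ i, hi ≤ i → i < totals.length → totals.getD i 0 > 900) →
    bsearch totals lo hi = firstOver totals := by
  intro n
  induction n with
  | zero =>
    intro lo hi hn hlohi hhil hlow hhigh
    have hlo : lo = hi := by omega
    unfold bsearch
    rw [if_neg (by omega)]
    exact firstOver_unique totals lo (by omega) hlow (fun hlt => hhigh lo (by omega) hlt)
  | succ n ih =>
    intro lo hi hn hlohi hhil hlow hhigh
    unfold bsearch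
    by_cases h : lo < hi
    · rw [if_pos h]
      set mid := (lo + hi) / 2 with hmid
      have hmlt : mid < hi := by omega
      have hmge : lo ≤ mid := by omega
      by_cases hp : totals.getD mid 0 > 900
      · rw [if_pos hp]
        refine ih lo mid (by omega) (by omega) (by omega) hlow ?_
        intro i h1 h2
        have := hmono mid i h1 h2
        omega
      · rw [if_neg hp]
        refine ih (mid + 1) hi (by omega) (by omega) hhil ?_ hhigh
        intro i h1
        have := hmono i mid (by omega) (by omega)
        omega
    · rw [if_neg h]
      have hlo : lo = hi := by omega
      exact firstOver_unique totals lo (by omega) hlow (fun hlt => hhigh lo (by omega) hlt)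

-- A's loop returns its current prefix extended by the longest further prefix within budget,
-- where t tracks the cumulative-table seed: t = used - 2 while nothing is selected, t = used after.
lemma joinAloop_eq (rest : List String) : ∀ (sel : List String) (used t : Int),
    t = (if sel.isEmpty then used - 2 else used) →
    joinAloop rest sel used = sel ++ rest.take (firstOver (buildTotals rest t)) := by
  induction rest with
  | nil => intro sel used t _; simp [joinAloop, buildTotals, firstOver]
  | cons s rest ih =>
    intro sel used t ht
    simp only [joinAloop, buildTotals, firstOver]
    have hcond : used + (if sel.isEmpty then (0:Int) else 2) + (PySem.Str.len s : Int)
        = t + 2 + (PySem.Str.len s : Int) := by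
      by_cases h : sel.isEmpty <;> simp [h] at ht ⊢ <;> omega
    by_cases hgt : t + 2 + (PySem.Str.len s : Int) > 900
    · rw [if_pos (by omega : used + (if sel.isEmpty then (0:Int) else 2) + (PySem.Str.len s : Int) > 900),
        if_pos hgt]
      simp
    · rw [if_neg (by omega : ¬ used + (if sel.isEmpty then (0:Int) else 2) + (PySem.Str.len s : Int) > 900),
        if_neg hgt]
      rw [ih (sel ++ [s]) _ (t + 2 + (PySem.Str.len s : Int)) (by rcases sel with _|⟨a,l⟩ <;> simp at ht ⊢ <;> omega)]
      simp [List.take_succ_cons]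

-- ===== VERDICT (by name: the statement is the Claim_ definition above) =====
theorem join_world_fact_snippets_py_spec : Claim_equal_join_world_fact_snippets_py := by
  intro snippets _
  unfold Spec_join_world_fact_snippets_py join_world_fact_snippets_py join_world_fact_snippets_py_alt
  have hbs : bsearch (buildTotals snippets (-2)) 0 (buildTotals snippets (-2)).length
      = firstOver (buildTotals snippets (-2)) :=
    bsearch_eq_firstOver _ (buildTotals_mono snippets (-2)) (buildTotals snippets (-2)).length
      0 _ (by omega) (by omega) le_rfl (by omega) (by omega)
  cases snippets with
  | nil => simp [buildTotals, bsearch]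
  | cons s rest =>
    dsimp only
    rw [hbs, joinAloop_eq (s :: rest) [] 0 (-2) (by simp)]
    simp only [List.nil_append, List.isEmpty_cons, if_neg (by decide : ¬ (false = true))]
    by_cases hk : firstOver (buildTotals (s :: rest) (-2)) = 0
    · simp [hk]
    · have : (List.take (firstOver (buildTotals (s :: rest) (-2))) (s :: rest)).isEmpty = false := by
        cases h : firstOver (buildTotals (s :: rest) (-2)) with
        | zero => exact absurd h hk
        | succ n => simp [List.take_succ_cons]
      simp [this, hk]
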